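-- pv_equiv track=rewrite | github.com/gohxuezhe/AdventofCode2023 | 15.py | part1
-- ===== SOURCE A (Python) =====
-- def part1(arr):
--     res = 0
--
--     for step in arr:
--         curr_res = 0
--         for char in step:
--             curr_res += ord(char)
--             curr_res *= 17
--             curr_res %= 256
--         res += curr_res
--
--     return res
-- ===== SOURCE B (Python) =====
-- def part1(arr):
--     # Closed form: the per-step HASH equals (sum of ord(c_i) * 17^(n-i)) mod 256,
--     # since each update acc -> (acc+ord(c))*17 mod 256 is affine.
--     def hash_closed(step):
--         n = len(step)
--         return sum(ord(c) * pow(17, n - i, 256) for i, c in enumerate(step)) % 256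
--     return sum(map(hash_closed, arr))
-- ===== Notes on version B (the rewrite author's own statement) =====
-- stated objective: alternative
-- what changed: B replaces A's sequential per-character state-updating fold with the closed-form polynomial evaluation: each step's HASH is computed as (sum of ord(c_i) * 17^(n-i) mod 256) mod 256 using modular exponentiation over enumerate(step), then the per-step hashes are summed.
import Mathlib
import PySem

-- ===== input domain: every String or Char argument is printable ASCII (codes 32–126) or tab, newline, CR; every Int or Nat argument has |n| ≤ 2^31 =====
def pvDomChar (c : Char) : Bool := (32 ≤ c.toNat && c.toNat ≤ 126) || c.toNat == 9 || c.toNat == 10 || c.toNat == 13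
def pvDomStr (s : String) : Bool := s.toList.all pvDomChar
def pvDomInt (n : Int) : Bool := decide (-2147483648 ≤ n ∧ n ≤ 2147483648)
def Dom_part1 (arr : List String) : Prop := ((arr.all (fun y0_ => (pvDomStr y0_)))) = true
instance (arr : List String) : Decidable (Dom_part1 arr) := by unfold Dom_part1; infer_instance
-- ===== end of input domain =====

-- B computes each step's HASH by the closed-form polynomial (Σ ord(c_i)·17^(n−i)) mod 256 with
-- modular powers, instead of A's sequential per-character fold; alternative decomposition, same cost.

-- ===== PORT A =====
-- A: nested loops, outer accumulates res, inner updates curr_res per char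
def part1 (arr : List String) : Int :=
  arr.foldl (fun res step =>
    res + step.toList.foldl (fun curr_res char =>
      ((curr_res + (char.toNat : Int)) * 17) % 256) 0) 0

-- ===== PORT B =====
-- B: per-step closed form: sum of ord(c) * pow(17, n-i, 256) over enumerate(step), then % 256.
-- '.toNat' on the exponent is exact: enumerate indices satisfy i < n, so n - i ≥ 1 ≥ 0.
def hashClosed (step : String) : Int :=
  ((PySem.List.enumerate step.toList).map
      (fun p => ((p.2.toNat : Int)) *
        PySem.Int.powMod 17 (((step.toList.length : Int)) - p.1).toNat 256)).sum % 256

def part1_alt (arr : List String) : Int :=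
  (arr.map hashClosed).sum

-- ===== PRECONDITION & SPEC =====
def Spec_part1 (arr : List String) (out : Int) : Prop := out = part1_alt arr
instance (arr : List String) (out : Int) : Decidable (Spec_part1 arr out) := by unfold Spec_part1; infer_instance

-- ===== CLAIM (what is proved, stated in full; the proofs are below) =====
def Claim_equal_part1 : Prop := ∀ (arr : List String), Dom_part1 arr → Spec_part1 arr (part1 arr)

-- ===== LEMMAS AND PROOFS =====

-- A's inner loop as a named function (proof-side helper)
def hashA (step : String) : Int :=
  step.toList.foldl (fun curr_res char => ((curr_res + (char.toNat : Int)) * 17) % 256) 0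

-- the unreduced HASH polynomial: poly [c0,…,c(n-1)] = Σ ci * 17^(n-i)
def poly : List Char → Int
  | [] => 0
  | c :: t => (c.toNat : Int) * 17 ^ (t.length + 1) + poly t

theorem mulmod256 (x y : Int) : x * (y % 256) % 256 = x * y % 256 := by
  rw [Int.mul_emod, Int.emod_emod_of_dvd _ dvd_rfl, ← Int.mul_emod]

-- A's fold computes the polynomial, reduced mod 256
theorem hashA_fold (l : List Char) : ∀ a : Int,
    l.foldl (fun curr_res char => ((curr_res + (char.toNat : Int)) * 17) % 256) (a % 256)
      = (a * 17 ^ l.length + poly l) % 256 := by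
  induction l with
  | nil => intro a; simp [poly]
  | cons c t ih =>
    intro a
    have step1 : ((a % 256 + (c.toNat : Int)) * 17) % 256
        = (((a + (c.toNat : Int)) * 17) % 256) := by
      rw [Int.mul_emod, Int.add_emod, Int.emod_emod_of_dvd _ dvd_rfl, ← Int.add_emod,
        ← Int.mul_emod]
    have ih' := ih ((a + (c.toNat : Int)) * 17)
    calc (c :: t).foldl (fun curr_res char => ((curr_res + (char.toNat : Int)) * 17) % 256) (a % 256)
        = t.foldl (fun curr_res char => ((curr_res + (char.toNat : Int)) * 17) % 256)
            (((a + (c.toNat : Int)) * 17) % 256) := by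
          simp [List.foldl, step1]
      _ = ((a + (c.toNat : Int)) * 17 * 17 ^ t.length + poly t) % 256 := ih'
      _ = (a * 17 ^ (c :: t).length + poly (c :: t)) % 256 := by
          simp only [poly, List.length_cons]
          ring_nf

theorem hashA_eq_poly (step : String) : hashA step = poly step.toList % 256 := by
  have h := hashA_fold step.toList 0
  simpa [hashA] using h

-- B's enumerate-sum computes the same polynomial mod 256 (N generalizes start + length)
theorem enumSum (l : List Char) : ∀ (s N : Int), N = s + l.length →
    ((PySem.List.enumerate l s).map
        (fun p => ((p.2.toNat : Int)) * PySem.Int.powMod 17 ((N - p.1).toNat) 256)).sum % 256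
      = poly l % 256 := by
  induction l with
  | nil => intro s N _; simp [PySem.List.enumerate_nil, poly]
  | cons c t ih =>
    intro s N hN
    have hexp : N - s = ((t.length + 1 : Nat) : Int) := by
      rw [hN, List.length_cons]; push_cast; ring
    have htail := ih (s + 1) N (by rw [hN, List.length_cons]; push_cast; ring)
    rw [PySem.List.enumerate_cons]
    simp only [List.map_cons, List.sum_cons, hexp, Int.toNat_natCast]
    rw [PySem.Int.powMod_eq_emod 17 (t.length + 1) (by norm_num)]
    rw [Int.add_emod, mulmod256, htail, ← Int.add_emod]
    simp [poly]

theorem hashClosed_eq_poly (step : String) : hashClosed step = poly step.toList % 256 := by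
  have h := enumSum step.toList 0 (step.toList.length : Int) (by simp)
  simpa [hashClosed] using h

-- A's outer fold is a sum of per-step hashes
theorem part1_foldl_sum (arr : List String) (r : Int) :
    arr.foldl (fun res step =>
      res + step.toList.foldl (fun curr_res char =>
        ((curr_res + (char.toNat : Int)) * 17) % 256) 0) r
      = r + (arr.map hashA).sum := by
  induction arr generalizing r with
  | nil => simp
  | cons s t ih => simp [List.foldl, ih, hashA]; ring

-- ===== VERDICT =====
theorem part1_spec : Claim_equal_part1 := by
  intro arr _
  show part1 arr = part1_alt arr
  have hA : part1 arr = (arr.map hashA).sum := by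
    simpa [part1] using part1_foldl_sum arr 0
  have hmap : arr.map hashA = arr.map hashClosed := by
    apply List.map_congr_left
    intro s _
    rw [hashA_eq_poly, hashClosed_eq_poly]
  rw [hA, hmap, part1_alt]
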